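-- pv_equiv track=rewrite | github.com/iosis-tech/zkemail-cairo | kar.py | generate_partial_sums
-- ===== SOURCE A (Python) =====
-- def generate_partial_sums(num_limbs):
--     # Generate the partial sums for the multiplication of two Uint4096 numbers
--     # Each Uint4096 has 32 limbs (d00, d01, ..., d31)
--
--     # Initialize the list to store the partial sums
--     partial_sums = []
--
--     # Loop through each limb of the first number (a)
--     for i in range(num_limbs):
--         # Loop through each limb of the second number (b)
--         for j in range(num_limbs):
--             # Calculate the product of a[i] and b[j]
--             product = f"a.d{i:02d} * b.d{j:02d}"
--
--             # Determine the index of the partial sum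
--             sum_index = i + j
--
--             # Append the product to the corresponding partial sum
--             if sum_index >= len(partial_sums):
--                 partial_sums.append([])
--             partial_sums[sum_index].append(product)
--
--     # Generate the code for the partial sums
--     code = []
--     for idx, terms in enumerate(partial_sums):
--         if terms:
--             code.append(f"local d{idx:02d} = {' + '.join(terms)};")
--
--     return "\n".join(code)
-- ===== SOURCE B (Python) =====
-- def generate_partial_sums(num_limbs):
--     lines = []
--     for s in range(2 * num_limbs - 1):
--         terms = [f"a.d{i:02d} * b.d{s - i:02d}"
--                  for i in range(max(0, s - num_limbs + 1), min(s, num_limbs - 1) + 1)]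
--         lines.append(f"local d{s:02d} = {' + '.join(terms)};")
--     return "\n".join(lines)
-- ===== Notes on version B (the rewrite author's own statement) =====
-- stated objective: simpler
-- what changed: Replaces the scatter into a growing list-of-lists keyed by i+j (plus a second enumerate/filter pass) with a direct gather: each output diagonal s is computed in one comprehension over the valid i-range, no intermediate table.
import Mathlib
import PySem

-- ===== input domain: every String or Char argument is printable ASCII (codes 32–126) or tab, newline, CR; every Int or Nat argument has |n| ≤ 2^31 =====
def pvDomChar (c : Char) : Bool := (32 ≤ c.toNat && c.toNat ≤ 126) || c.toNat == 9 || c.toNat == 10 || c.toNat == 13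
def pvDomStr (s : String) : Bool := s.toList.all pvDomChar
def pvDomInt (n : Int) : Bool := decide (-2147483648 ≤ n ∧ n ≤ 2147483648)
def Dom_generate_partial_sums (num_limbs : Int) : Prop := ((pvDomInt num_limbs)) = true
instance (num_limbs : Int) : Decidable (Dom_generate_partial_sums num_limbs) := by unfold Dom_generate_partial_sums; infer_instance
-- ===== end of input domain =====

-- B gathers each output diagonal directly in one pass instead of A's scatter into a
-- growing list-of-lists keyed by i+j followed by an enumerate/filter pass (objective: simpler).


-- ===== PORT A =====
-- f"{i:02d}": zero-pad to width 2; exact for 0 ≤ i, the only values formatted here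
def fmtA (i : Int) : String := if i < 10 then "0" ++ PySem.Int.toStr i else PySem.Int.toStr i

def generate_partial_sums (num_limbs : Int) : String :=
  let partial_sums : List (List String) :=
    (PySem.List.pyRange 0 num_limbs 1).foldl (fun ps i =>
      (PySem.List.pyRange 0 num_limbs 1).foldl (fun ps j =>
        let product := "a.d" ++ fmtA i ++ " * b.d" ++ fmtA j
        let sum_index := i + j
        let ps := if sum_index ≥ PySem.List.len ps then ps ++ [([] : List String)] else ps
        -- partial_sums[sum_index].append(product): sum_index is always in range here (0 ≤ i+j < len), so exact
        ps.modify sum_index.toNat (fun t => t ++ [product])) ps) []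
  let code : List String :=
    (PySem.List.enumerate partial_sums 0).foldl (fun code it =>
      if it.2 ≠ [] then
        code ++ ["local d" ++ fmtA it.1 ++ " = " ++ PySem.Str.join " + " it.2 ++ ";"]
      else code) []
  PySem.Str.join "\n" code

-- ===== PORT B =====
-- f"{i:02d}" (B's copy); exact for 0 ≤ i, the only values formatted here
def fmtB (i : Int) : String := if i < 10 then "0" ++ PySem.Int.toStr i else PySem.Int.toStr i

def generate_partial_sums_alt (num_limbs : Int) : String :=
  let lines : List String :=
    (PySem.List.pyRange 0 (2 * num_limbs - 1) 1).foldl (fun lines s =>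
      let terms : List String :=
        (PySem.List.pyRange (max 0 (s - num_limbs + 1)) (min s (num_limbs - 1) + 1) 1).map
          (fun i => "a.d" ++ fmtB i ++ " * b.d" ++ fmtB (s - i))
      lines ++ ["local d" ++ fmtB s ++ " = " ++ PySem.Str.join " + " terms ++ ";"]) []
  PySem.Str.join "\n" lines

-- ===== PRECONDITION & SPEC =====
def Spec_generate_partial_sums (num_limbs : Int) (out : String) : Prop := out = generate_partial_sums_alt num_limbs
instance (num_limbs : Int) (out : String) : Decidable (Spec_generate_partial_sums num_limbs out) := by unfold Spec_generate_partial_sums; infer_instance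

-- ===== CLAIM (what is proved, stated in full; the proofs are below) =====
def Claim_equal_generate_partial_sums : Prop := ∀ (num_limbs : Int), Dom_generate_partial_sums num_limbs → Spec_generate_partial_sums num_limbs (generate_partial_sums num_limbs)

-- ===== LEMMAS AND PROOFS =====

-- Nat-level views of the strings both ports build
def prodN (i j : Nat) : String := "a.d" ++ fmtA (i : Int) ++ " * b.d" ++ fmtA (j : Int)
def lineN (s : Nat) (ts : List String) : String :=
  "local d" ++ fmtA (s : Int) ++ " = " ++ PySem.Str.join " + " ts ++ ";"

-- Nat-level view of A's inner-loop body
def stepN (ps : List (List String)) (p : Nat × Nat) : List (List String) :=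
  (if ps.length ≤ p.1 + p.2 then ps ++ [([] : List String)] else ps).modify
    (p.1 + p.2) (fun t => t ++ [prodN p.1 p.2])

-- abstract state of A's table after processing a list of (i, j) pairs
def maxS (L : List (Nat × Nat)) : Nat := L.foldr (fun p m => max (p.1 + p.2 + 1) m) 0
def entryL (L : List (Nat × Nat)) (s : Nat) : List String :=
  L.filterMap (fun q => if q.1 + q.2 = s then some (prodN q.1 q.2) else none)
def stateL (L : List (Nat × Nat)) : List (List String) := (List.range (maxS L)).map (entryL L)

def rowP (n i : Nat) : List (Nat × Nat) := (List.range n).map (fun j => (i, j))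
def upToP (n i : Nat) : List (Nat × Nat) := (List.range i).flatMap (fun r => rowP n r)

-- B's terms for diagonal s, in Nat form
def termsN (n s : Nat) : List String :=
  (List.range (min (s + 1) n - (s + 1 - n))).map (fun k => prodN (s + 1 - n + k) (s - (s + 1 - n + k)))

theorem fmtB_eq : fmtB = fmtA := rfl

theorem maxS_cons (q : Nat × Nat) (L : List (Nat × Nat)) :
    maxS (q :: L) = max (q.1 + q.2 + 1) (maxS L) := rfl

theorem maxS_foldr (L : List (Nat × Nat)) :
    ∀ m : Nat, L.foldr (fun p m => max (p.1 + p.2 + 1) m) m = max (maxS L) m := by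
  induction L with
  | nil => intro m; simp [maxS]
  | cons q L ih =>
    intro m
    rw [List.foldr_cons, ih m, maxS_cons]
    omega

theorem maxS_append (L1 L2 : List (Nat × Nat)) : maxS (L1 ++ L2) = max (maxS L1) (maxS L2) := by
  unfold maxS
  rw [List.foldr_append]
  exact maxS_foldr L1 _

theorem mem_lt_maxS (L : List (Nat × Nat)) (q : Nat × Nat) (h : q ∈ L) : q.1 + q.2 < maxS L := by
  induction L with
  | nil => simp at h
  | cons p L ih =>
    rw [maxS_cons]
    rcases List.mem_cons.mp h with h | h
    · subst h; omega
    · have := ih h; omega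

theorem entryL_append (L1 L2 : List (Nat × Nat)) (s : Nat) :
    entryL (L1 ++ L2) s = entryL L1 s ++ entryL L2 s := by
  unfold entryL; rw [List.filterMap_append]

theorem entryL_big (L : List (Nat × Nat)) (s : Nat) (h : maxS L ≤ s) : entryL L s = [] := by
  unfold entryL
  rw [List.filterMap_eq_nil_iff]
  intro q hq
  have := mem_lt_maxS L q hq
  simp only [ite_eq_right_iff]
  intro he; omega

theorem length_stateL (L : List (Nat × Nat)) : (stateL L).length = maxS L := by
  simp [stateL]

theorem step_state (L : List (Nat × Nat)) (p : Nat × Nat) (h : p.1 + p.2 ≤ maxS L) :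
    stepN (stateL L) p = stateL (L ++ [p]) := by
  obtain ⟨a, b⟩ := p
  simp only at h
  have hentry : ∀ t, entryL (L ++ [(a, b)]) t = entryL L t ++ (if a + b = t then [prodN a b] else []) := by
    intro t
    rw [entryL_append]
    congr 1
    unfold entryL
    by_cases hab : a + b = t
    · simp [hab]
    · simp [hab]
  have hm2 : maxS (L ++ [(a, b)]) = max (maxS L) (a + b + 1) := by
    rw [maxS_append]
    congr 1
  unfold stepN
  simp only
  by_cases hc : (stateL L).length ≤ a + b
  · have hs0 : a + b = maxS L := by rw [length_stateL] at hc; omega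
    rw [if_pos hc]
    apply List.ext_getElem
    · simp [stateL, hm2]
      omega
    · intro t h1 h2
      have h1' : t < maxS L + 1 := by
        simpa [stateL] using h1
      rw [List.getElem_modify]
      simp only [stateL, List.getElem_map, List.getElem_range]
      rw [hentry t]
      by_cases ht : t < maxS L
      · rw [List.getElem_append_left (by simpa using ht)]
        rw [if_neg (by omega), if_neg (by omega), List.append_nil]
        simp
      · have ht' : t = maxS L := by omega
        rw [List.getElem_append_right (by simp; omega)]
        rw [if_pos (by omega), if_pos (by omega)]
        rw [entryL_big L t (by omega)]
        simp [ht']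
  · rw [if_neg hc]
    rw [length_stateL] at hc
    apply List.ext_getElem
    · simp [stateL, hm2]
      omega
    · intro t h1 h2
      have h1' : t < maxS L := by
        simpa [stateL] using h1
      rw [List.getElem_modify]
      simp only [stateL, List.getElem_map, List.getElem_range]
      rw [hentry t]
      by_cases ht : a + b = t
      · rw [if_pos ht, if_pos ht]
      · rw [if_neg ht, if_neg ht, List.append_nil]

theorem maxS_rowPrefix (i j : Nat) :
    maxS ((List.range j).map (fun j' => (i, j'))) = if j = 0 then 0 else i + j := by
  induction j with
  | zero => simp [maxS]
  | succ j ih =>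
    rw [List.range_succ, List.map_append, maxS_append, ih]
    have : maxS ((List.map (fun j' => (i, j')) [j])) = i + j + 1 := by simp [maxS]
    rw [this]
    simp only [Nat.max_def]
    split_ifs <;> omega

theorem maxS_upTo (n i : Nat) (hn : 1 ≤ n) :
    maxS (upToP n i) = if i = 0 then 0 else n + i - 1 := by
  induction i with
  | zero => simp [upToP, maxS]
  | succ i ih =>
    unfold upToP
    rw [List.range_succ, List.flatMap_append, maxS_append]
    unfold upToP at ih
    rw [ih]
    have hrow : maxS (List.flatMap (fun r => rowP n r) [i]) = i + n := by
      simp only [List.flatMap_cons, List.flatMap_nil, List.append_nil]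
      unfold rowP
      rw [maxS_rowPrefix, if_neg (by omega)]
    rw [hrow]
    by_cases hi0 : i = 0
    · subst hi0
      rw [if_pos rfl, if_neg (by omega)]
      omega
    · rw [if_neg hi0, if_neg (by omega)]
      omega

theorem inner_fold (n i : Nat) (hn : 1 ≤ n) (U : List (Nat × Nat))
    (hU : maxS U = if i = 0 then 0 else n + i - 1) :
    ∀ j, j ≤ n →
      ((List.range j).map (fun j' => (i, j'))).foldl stepN (stateL U) =
        stateL (U ++ (List.range j).map (fun j' => (i, j'))) := by
  intro j
  induction j with
  | zero => simp
  | succ j ih =>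
    intro hj
    rw [List.range_succ, List.map_append, List.foldl_append, ih (by omega)]
    simp only [List.map_cons, List.map_nil, List.foldl_cons, List.foldl_nil]
    have hb : i + j ≤ maxS (U ++ (List.range j).map fun j' => (i, j')) := by
      rw [maxS_append, maxS_rowPrefix, hU]
      simp only [Nat.max_def]
      split_ifs <;> omega
    rw [step_state _ _ hb, List.append_assoc]

theorem outer_fold (n : Nat) (hn : 1 ≤ n) :
    ∀ i, i ≤ n →
      (List.range i).foldl
        (fun ps r => (List.range n).foldl (fun ps j => stepN ps (r, j)) ps) [] =
      stateL (upToP n i) := by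
  intro i
  induction i with
  | zero => simp [upToP, stateL, maxS]
  | succ i ih =>
    intro hi
    rw [List.range_succ, List.foldl_append, ih (by omega)]
    simp only [List.foldl_cons, List.foldl_nil]
    have hrow : (List.range n).foldl (fun ps j => stepN ps (i, j)) (stateL (upToP n i)) =
        stateL (upToP n i ++ (List.range n).map (fun j' => (i, j'))) := by
      have h2 := inner_fold n i hn _ (maxS_upTo n i hn) n le_rfl
      rw [List.foldl_map] at h2
      exact h2
    rw [hrow]
    unfold upToP
    rw [List.range_succ, List.flatMap_append]
    simp [rowP]

theorem flatMap_range_if {α : Type} (g : Nat → α) (n lo hi : Nat) (hhi : hi ≤ n) :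
    (List.range n).flatMap (fun r => if lo ≤ r ∧ r < hi then [g r] else []) =
      (List.range (hi - lo)).map (fun k => g (lo + k)) := by
  induction n generalizing hi with
  | zero =>
    have h0 : hi = 0 := by omega
    subst h0
    simp
  | succ n ih =>
    rw [List.range_succ, List.flatMap_append]
    by_cases hle : hi ≤ n
    · rw [ih hi hle]
      simp only [List.flatMap_cons, List.flatMap_nil, List.append_nil]
      rw [if_neg (by omega)]
      simp
    · have hhi' : hi = n + 1 := by omega
      subst hhi'
      by_cases hlo : lo ≤ n
      · have hcg : (List.range n).flatMap (fun r => if lo ≤ r ∧ r < n + 1 then [g r] else []) =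
            (List.range n).flatMap (fun r => if lo ≤ r ∧ r < n then [g r] else []) :=
          List.flatMap_congr (fun r hr =>
            if_congr (by have := List.mem_range.mp hr; omega) rfl rfl)
        rw [hcg, ih n le_rfl]
        simp only [List.flatMap_cons, List.flatMap_nil, List.append_nil]
        rw [if_pos (by omega)]
        have hsub : n + 1 - lo = (n - lo) + 1 := by omega
        rw [hsub, List.range_succ, List.map_append]
        simp only [List.map_cons, List.map_nil]
        congr 3
        omega
      · have h0 : n + 1 - lo = 0 := by omega
        rw [h0]
        simp only [List.range_zero, List.map_nil]
        have h1 : (List.range n).flatMap (fun r => if lo ≤ r ∧ r < n + 1 then [g r] else []) = [] :=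
          List.flatMap_eq_nil_iff.mpr (fun r hr => by
            rw [if_neg (by have := List.mem_range.mp hr; omega)])
        rw [h1]
        simp only [List.flatMap_cons, List.flatMap_nil, List.append_nil, List.nil_append]
        rw [if_neg (by omega)]

theorem entry_row (n r s : Nat) :
    entryL (rowP n r) s = if r ≤ s ∧ s < r + n then [prodN r (s - r)] else [] := by
  unfold rowP entryL
  rw [List.filterMap_map]
  have hfun : ((fun q : Nat × Nat => if q.1 + q.2 = s then some (prodN q.1 q.2) else none) ∘
      (fun j => (r, j))) = fun j => if r + j = s then some (prodN r j) else none := rfl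
  rw [hfun, List.filterMap_eq_flatMap_toList]
  by_cases h : r ≤ s ∧ s < r + n
  · rw [if_pos h]
    have hfun2 : (fun j => ((if r + j = s then some (prodN r j) else none) : Option String).toList)
        = fun j => if (s - r) ≤ j ∧ j < (s - r) + 1 then [prodN r j] else [] := by
      funext j
      by_cases hj : r + j = s
      · rw [if_pos hj, if_pos (by omega)]; rfl
      · rw [if_neg hj, if_neg (by omega)]; rfl
    rw [hfun2, flatMap_range_if (fun j => prodN r j) n (s - r) (s - r + 1) (by omega)]
    have h1 : s - r + 1 - (s - r) = 1 := by omega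
    rw [h1]
    simp only [List.range_one, List.map_cons, List.map_nil]
    simp
  · rw [if_neg h]
    apply List.flatMap_eq_nil_iff.mpr
    intro j hj
    have : j < n := List.mem_range.mp hj
    rw [if_neg (by omega)]
    rfl

theorem entry_upTo (n s : Nat) : entryL (upToP n n) s = termsN n s := by
  unfold upToP entryL
  rw [List.filterMap_flatMap]
  have hcong : ∀ r ∈ List.range n,
      List.filterMap (fun q => if q.1 + q.2 = s then some (prodN q.1 q.2) else none) (rowP n r) =
        (if s + 1 - n ≤ r ∧ r < min (s + 1) n then [prodN r (s - r)] else []) := by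
    intro r hr
    have hr' : r < n := List.mem_range.mp hr
    rw [show List.filterMap (fun q => if q.1 + q.2 = s then some (prodN q.1 q.2) else none)
        (rowP n r) = entryL (rowP n r) s from rfl]
    rw [entry_row]
    exact if_congr (by omega) rfl rfl
  rw [List.flatMap_congr hcong]
  exact flatMap_range_if _ n _ _ (by omega)

theorem termsN_ne_nil (n s : Nat) (hn : 1 ≤ n) (hs : s < 2 * n - 1) : termsN n s ≠ [] := by
  unfold termsN
  simp only [ne_eq, List.map_eq_nil_iff, List.range_eq_nil]
  omega

-- A's inner body equals stepN, on Nat-cast indices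
theorem bodyA_bridge (i j : Nat) (ps : List (List String)) :
    (let product := "a.d" ++ fmtA (i : Int) ++ " * b.d" ++ fmtA (j : Int)
     let sum_index := (i : Int) + (j : Int)
     let ps' := if sum_index ≥ PySem.List.len ps then ps ++ [([] : List String)] else ps
     ps'.modify sum_index.toNat (fun t => t ++ [product])) = stepN ps (i, j) := by
  simp only [stepN, prodN]
  have h1 : ((i : Int) + j).toNat = i + j := by omega
  have h2 : ((i : Int) + j ≥ PySem.List.len ps) ↔ (ps.length ≤ i + j) := by
    simp only [PySem.List.len_eq, ge_iff_le]
    omega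
  rw [h1, if_congr h2 rfl rfl]

-- A's full table, for num_limbs = ↑n
theorem tableA (n : Nat) (hn : 1 ≤ n) :
    ((PySem.List.pyRange 0 (n : Int) 1).foldl (fun ps i =>
      (PySem.List.pyRange 0 (n : Int) 1).foldl (fun ps j =>
        let product := "a.d" ++ fmtA i ++ " * b.d" ++ fmtA j
        let sum_index := i + j
        let ps := if sum_index ≥ PySem.List.len ps then ps ++ [([] : List String)] else ps
        ps.modify sum_index.toNat (fun t => t ++ [product])) ps) []) =
      (List.range (2 * n - 1)).map (termsN n) := by
  rw [PySem.List.pyRange_zero_nat n]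
  simp only [List.foldl_map]
  refine Eq.trans (PySem.List.foldl_congr_mem (List.range n) _
      (fun ps r => (List.range n).foldl (fun ps j => stepN ps (r, j)) ps) [] ?_) ?_
  · intro acc i _
    exact PySem.List.foldl_congr_mem (List.range n) _ _ acc
      (fun acc2 j _ => bodyA_bridge i j acc2)
  · rw [outer_fold n hn n le_rfl]
    unfold stateL
    rw [maxS_upTo n n hn, if_neg (by omega)]
    have he : entryL (upToP n n) = termsN n := funext (entry_upTo n)
    rw [he]
    congr 2
    omega

-- main equality for positive num_limbs
theorem main_pos (n : Nat) (hn : 1 ≤ n) :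
    generate_partial_sums (n : Int) = generate_partial_sums_alt (n : Int) := by
  unfold generate_partial_sums generate_partial_sums_alt
  rw [tableA n hn]
  show PySem.Str.join "\n"
      (List.foldl
        (fun code it =>
          if it.2 ≠ [] then
            code ++ ["local d" ++ fmtA it.1 ++ " = " ++ PySem.Str.join " + " it.2 ++ ";"]
          else code)
        [] (PySem.List.enumerate (List.map (termsN n) (List.range (2 * n - 1))))) =
    PySem.Str.join "\n"
      (List.foldl
        (fun lines s =>
          lines ++ ["local d" ++ fmtB s ++ " = " ++ PySem.Str.join " + "
            (List.map (fun i => "a.d" ++ fmtB i ++ " * b.d" ++ fmtB (s - i))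
              (PySem.List.pyRange (max 0 (s - ↑n + 1)) (min s (↑n - 1) + 1))) ++ ";"])
        [] (PySem.List.pyRange 0 (2 * ↑n - 1)))
  congr 1
  have hAcond : (List.foldl
        (fun code it =>
          if it.2 ≠ [] then
            code ++ ["local d" ++ fmtA it.1 ++ " = " ++ PySem.Str.join " + " it.2 ++ ";"]
          else code)
        ([] : List String) (PySem.List.enumerate (List.map (termsN n) (List.range (2 * n - 1))))) =
      (List.foldl
        (fun code it => code ++ ["local d" ++ fmtA it.1 ++ " = " ++ PySem.Str.join " + " it.2 ++ ";"])
        [] (PySem.List.enumerate (List.map (termsN n) (List.range (2 * n - 1))))) := by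
    apply PySem.List.foldl_congr_mem
    intro acc it hit
    obtain ⟨k, hk, hp⟩ := (PySem.List.mem_enumerate_iff _ _ _).mp hit
    subst hp
    rw [if_pos ?_]
    simp only [List.getElem_map, List.getElem_range]
    have hk' : k < 2 * n - 1 := by simpa using hk
    simpa using termsN_ne_nil n k hn hk'
  rw [hAcond, PySem.List.foldl_append_singleton_eq_map, List.nil_append]
  rw [PySem.List.enumerate_eq_map_pyRange _ ([] : List String)]
  rw [PySem.List.len_eq, List.length_map, List.length_range]
  rw [PySem.List.pyRange_zero_nat, List.map_map, List.map_map]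
  rw [show (2 * (n : Int) - 1) = ((2 * n - 1 : Nat) : Int) from by omega]
  rw [PySem.List.pyRange_zero_nat, PySem.List.foldl_append_singleton_eq_map, List.nil_append,
    List.map_map]
  apply List.map_congr_left
  intro s hs
  have hs' : s < 2 * n - 1 := List.mem_range.mp hs
  simp only [Function.comp_apply]
  rw [PySem.List.pyGetD_natCast, PySem.List.getD_map_range _ _ _ _ hs']
  rw [fmtB_eq]
  rw [show max 0 ((s : Int) - ↑n + 1) = ((s + 1 - n : Nat) : Int) from by omega,
      show min (s : Int) (↑n - 1) + 1 = ((min (s + 1) n : Nat) : Int) from by omega,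
      PySem.List.pyRange_one,
      show (((min (s + 1) n : Nat) : Int) - ((s + 1 - n : Nat) : Int)).toNat
        = min (s + 1) n - (s + 1 - n) from by omega,
      List.map_map]
  have ht : (List.range (min (s + 1) n - (s + 1 - n))).map
      ((fun i => "a.d" ++ fmtA i ++ " * b.d" ++ fmtA ((s : Int) - i)) ∘
        (fun k : Nat => ((s + 1 - n : Nat) : Int) + ↑k)) = termsN n s := by
    unfold termsN
    apply List.map_congr_left
    intro k hk
    have hk' : k < min (s + 1) n - (s + 1 - n) := List.mem_range.mp hk
    simp only [Function.comp_apply]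
    unfold prodN
    rw [show ((s + 1 - n : Nat) : Int) + (k : Int) = ((s + 1 - n + k : Nat) : Int) from by
          push_cast; ring,
        show (s : Int) - ((s + 1 - n + k : Nat) : Int) = ((s - (s + 1 - n + k) : Nat) : Int) from by
          omega]
  rw [ht]

theorem main_nonpos (m : Int) (hm : m ≤ 0) :
    generate_partial_sums m = generate_partial_sums_alt m := by
  unfold generate_partial_sums generate_partial_sums_alt
  rw [PySem.List.pyRange_one_eq_nil hm, PySem.List.pyRange_one_eq_nil (by omega)]
  rfl

-- ===== VERDICT (by name: the statement is the Claim_ definition above) =====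
theorem generate_partial_sums_spec : Claim_equal_generate_partial_sums := by
  intro num_limbs _
  unfold Spec_generate_partial_sums
  by_cases h : num_limbs ≤ 0
  · exact main_nonpos num_limbs h
  · have : num_limbs = ((num_limbs.toNat : Nat) : Int) := by omega
    rw [this]
    exact main_pos num_limbs.toNat (by omega)
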